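-- pv_equiv track=rewrite | github.com/allRisc/EagleClassLists | src/eagleclasslists/app/grade_list_model.py | _sort_grades
-- ===== SOURCE A (Python) =====
-- def _sort_grades(grades: set[str]) -> list[str]:
--     """Sort grade values numerically when possible, then alphabetically.
--
--     Numeric grades are sorted by their integer value (1, 2, 3, ...),
--     while non-numeric grades are sorted alphabetically.
--     """
--     numeric: list[tuple[int, str]] = []
--     alpha: list[str] = []
--     for g in grades:
--         try:
--             numeric.append((int(g), g))
--         except ValueError:
--             alpha.append(g)
--     numeric.sort()
--     alpha.sort()
--     return [g for _, g in numeric] + alpha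
-- ===== SOURCE B (Python) =====
-- def _sort_grades(grades):
--     """Sort grade values numerically when possible, then alphabetically.
--
--     One pass of sorted() with a tagged tuple key: numeric grades get
--     (0, int(g), g) so they come first ordered by value, non-numeric get
--     (1, 0, g) so they follow in alphabetical order.
--     """
--     def _key(g):
--         try:
--             return (0, int(g), g)
--         except ValueError:
--             return (1, 0, g)
--     return sorted(grades, key=_key)
-- ===== Notes on version B (the rewrite author's own statement) =====
-- stated objective: idiomatic
-- what changed: Replaces the partition-into-two-lists plus two separate sorts plus concatenation with a single sorted() call over the whole input using a tagged tuple key (0,int(g),g)/(1,0,g).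
import Mathlib
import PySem

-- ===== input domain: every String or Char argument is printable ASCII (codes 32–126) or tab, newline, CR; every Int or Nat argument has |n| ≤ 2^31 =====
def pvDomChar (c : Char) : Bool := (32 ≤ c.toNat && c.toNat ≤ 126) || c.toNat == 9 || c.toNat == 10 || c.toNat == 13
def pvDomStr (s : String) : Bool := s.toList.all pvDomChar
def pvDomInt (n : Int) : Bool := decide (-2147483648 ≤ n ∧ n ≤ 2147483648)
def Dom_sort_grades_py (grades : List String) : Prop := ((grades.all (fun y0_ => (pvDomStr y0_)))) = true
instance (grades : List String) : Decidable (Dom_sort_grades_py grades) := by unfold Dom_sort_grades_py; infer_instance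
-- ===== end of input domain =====

-- B replaces A's partition-into-two-lists + two sorts + concatenation by one sorted() call
-- with a tagged tuple key (more idiomatic; same O(n log n) cost).

-- ===== PORT A =====
-- the partition loop: try int(g) -> numeric.append((int(g), g)); except ValueError -> alpha.append(g)
def pvPartStep (acc : List (Int × String) × List String) (g : String) :
    List (Int × String) × List String :=
  match PySem.Int.ofStr? g with
  | some n => (acc.1 ++ [(n, g)], acc.2)
  | none => (acc.1, acc.2 ++ [g])

def sort_grades_py (grades : List String) : List String :=
  let acc := grades.foldl pvPartStep ([], [])
  -- numeric.sort(): Python sorts (int, str) pairs lexicographically = the Lex order on ℤ × String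
  let numeric := PySem.List.sorted acc.1 (fun p => toLex p)
  -- alpha.sort()
  let alpha := PySem.List.sorted acc.2 (fun g => g)
  numeric.map (fun p => p.2) ++ alpha

-- ===== PORT B =====
-- B's key g ↦ (0, int(g), g) / (1, 0, g): ported as sorted2 (PySem's form for tuple keys),
-- with the first tuple slot as k1 and the remaining (int, str) pair, Lex-ordered, as k2.
def pvTag (g : String) : ℤ :=
  match PySem.Int.ofStr? g with
  | some _ => 0
  | none => 1

def pvRest (g : String) : Lex (ℤ × String) :=
  match PySem.Int.ofStr? g with
  | some n => toLex (n, g)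
  | none => toLex (0, g)

def sort_grades_py_alt (grades : List String) : List String :=
  PySem.List.sorted2 grades pvTag pvRest

-- ===== PRECONDITION & SPEC =====
def Spec_sort_grades_py (grades : List String) (out : List String) : Prop := out = sort_grades_py_alt grades
instance (grades : List String) (out : List String) : Decidable (Spec_sort_grades_py grades out) := by unfold Spec_sort_grades_py; infer_instance

-- ===== CLAIM (what is proved, stated in full; the proofs are below) =====
def Claim_equal_sort_grades_py : Prop := ∀ (grades : List String), Dom_sort_grades_py grades → Spec_sort_grades_py grades (sort_grades_py grades)

-- ===== LEMMAS AND PROOFS =====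

-- B's full tuple key as one (proof-side) Lex value
def pvKeyB (g : String) : Lex (ℤ × Lex (ℤ × String)) :=
  match PySem.Int.ofStr? g with
  | some n => toLex (0, toLex (n, g))
  | none => toLex (1, toLex (0, g))

-- sorted(xs, key=(k1, k2)) is sorted(xs) by the Lex order on (k1 x, k2 x)
lemma pvSorted2_eq_sorted_lex {α κ₁ κ₂ : Type} [LinearOrder κ₁] [LinearOrder κ₂]
    (xs : List α) (k1 : α → κ₁) (k2 : α → κ₂) :
    PySem.List.sorted2 xs k1 k2 = PySem.List.sorted xs (fun x => toLex (k1 x, k2 x)) := by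
  have hb : (fun a b => decide (k1 a < k1 b) || (!decide (k1 b < k1 a) && decide (k2 a < k2 b)))
      = (fun a b => decide ((toLex (k1 a, k2 a) : Lex (κ₁ × κ₂)) < toLex (k1 b, k2 b))) := by
    funext a b
    simp only [Prod.Lex.lt_iff, ofLex_toLex]
    rcases lt_trichotomy (k1 a) (k1 b) with h | h | h
    · simp [h]
    · simp [h]
    · simp [not_lt_of_gt h, h]
      exact fun he => absurd he h.ne'
  unfold PySem.List.sorted2 PySem.List.sorted
  simp only [hb, if_neg (Bool.false_ne_true)]

lemma pvAlt_eq (gs : List String) :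
    sort_grades_py_alt gs = PySem.List.sorted gs pvKeyB := by
  unfold sort_grades_py_alt
  rw [pvSorted2_eq_sorted_lex]
  congr 1
  funext g
  unfold pvKeyB pvTag pvRest
  cases h : PySem.Int.ofStr? g <;> simp

def pvNumOf (g : String) : Option (Int × String) := (PySem.Int.ofStr? g).map (fun n => (n, g))
def pvIsAlpha (g : String) : Bool := (PySem.Int.ofStr? g).isNone

lemma pvFold_eq (gs : List String) (n0 : List (Int × String)) (a0 : List String) :
    gs.foldl pvPartStep (n0, a0) = (n0 ++ gs.filterMap pvNumOf, a0 ++ gs.filter pvIsAlpha) := by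
  induction gs generalizing n0 a0 with
  | nil => simp
  | cons g gs ih =>
    cases h : PySem.Int.ofStr? g with
    | some n =>
      simp [pvPartStep, h, ih, pvNumOf, pvIsAlpha]
    | none =>
      simp [pvPartStep, h, ih, pvNumOf, pvIsAlpha]

lemma pvPerm (gs : List String) :
    ((gs.filterMap pvNumOf).map (fun p => p.2) ++ gs.filter pvIsAlpha).Perm gs := by
  induction gs with
  | nil => simp
  | cons g gs ih =>
    cases h : PySem.Int.ofStr? g with
    | some n =>
      simpa [pvNumOf, pvIsAlpha, h] using ih.cons g
    | none =>
      simp only [pvNumOf, pvIsAlpha, h, List.filterMap_cons, List.filter_cons,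
        Option.map_none, Option.isNone_none, if_pos]
      exact (List.perm_middle).trans (ih.cons g)

lemma pvMem_numeric {gs : List String} {p : Int × String}
    (hp : p ∈ gs.filterMap pvNumOf) : PySem.Int.ofStr? p.2 = some p.1 := by
  rcases List.mem_filterMap.mp hp with ⟨g, _, hg⟩
  unfold pvNumOf at hg
  cases h : PySem.Int.ofStr? g with
  | some n => rw [h] at hg; simp at hg; rw [← hg]; simpa using h
  | none => rw [h] at hg; simp at hg

lemma pvMem_alpha {gs : List String} {g : String}
    (hg : g ∈ gs.filter pvIsAlpha) : PySem.Int.ofStr? g = none := by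
  have := List.of_mem_filter hg
  unfold pvIsAlpha at this
  exact Option.isNone_iff_eq_none.mp this

lemma pvKeyB_inj : Function.Injective pvKeyB := by
  intro a b h
  unfold pvKeyB at h
  cases ha : PySem.Int.ofStr? a <;> cases hb : PySem.Int.ofStr? b <;>
    rw [ha, hb] at h <;> simp [Prod.ext_iff] at h <;> tauto

lemma pvPairwiseA (gs : List String) :
    List.Pairwise (fun a b => pvKeyB a ≤ pvKeyB b) (sort_grades_py gs) := by
  unfold sort_grades_py
  simp only [pvFold_eq gs [] [], List.nil_append]
  rw [List.pairwise_append]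
  refine ⟨?_, ?_, ?_⟩
  · rw [List.pairwise_map]
    refine (PySem.List.sorted_pairwise (gs.filterMap pvNumOf) (fun p => toLex p)).imp_of_mem ?_
    intro p q hp hq hle
    have hp' := pvMem_numeric (((PySem.List.sorted_perm _ _ _).mem_iff).mp hp)
    have hq' := pvMem_numeric (((PySem.List.sorted_perm _ _ _).mem_iff).mp hq)
    simp only [pvKeyB, hp', hq']
    rw [Prod.Lex.le_iff]
    exact Or.inr ⟨rfl, hle⟩
  · refine (PySem.List.sorted_pairwise (gs.filter pvIsAlpha) (fun g => g)).imp_of_mem ?_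
    intro a b ha hb hle
    have ha' := pvMem_alpha (((PySem.List.sorted_perm _ _ _).mem_iff).mp ha)
    have hb' := pvMem_alpha (((PySem.List.sorted_perm _ _ _).mem_iff).mp hb)
    simp only [pvKeyB, ha', hb']
    rw [Prod.Lex.le_iff]
    refine Or.inr ⟨rfl, ?_⟩
    rw [Prod.Lex.le_iff]
    exact Or.inr ⟨rfl, hle⟩
  · intro a ha b hb
    rcases List.mem_map.mp ha with ⟨p, hp, rfl⟩
    have hp' := pvMem_numeric (((PySem.List.sorted_perm _ _ _).mem_iff).mp hp)
    have hb' := pvMem_alpha (((PySem.List.sorted_perm _ _ _).mem_iff).mp hb)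
    simp only [pvKeyB, hp', hb']
    rw [Prod.Lex.le_iff]
    exact Or.inl (by norm_num)

lemma pvPermA (gs : List String) : (sort_grades_py gs).Perm gs := by
  unfold sort_grades_py
  simp only [pvFold_eq gs [] [], List.nil_append]
  refine List.Perm.trans ?_ (pvPerm gs)
  exact ((PySem.List.sorted_perm _ _ _).map _).append (PySem.List.sorted_perm _ _ _)

-- ===== VERDICT (by name: the statement is the Claim_ definition above) =====
theorem sort_grades_py_spec : Claim_equal_sort_grades_py := by
  intro gs _
  unfold Spec_sort_grades_py
  rw [pvAlt_eq]
  refine PySem.List.eq_of_perm_of_pairwise_le_of_injective pvKeyB pvKeyB_inj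
    ((pvPermA gs).trans (PySem.List.sorted_perm gs pvKeyB false).symm)
    (pvPairwiseA gs) ?_
  exact PySem.List.sorted_pairwise gs pvKeyB
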